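-- pv_equiv track=rewrite | github.com/vigneshv-i/Tiger-Analytics-Assignment | python-fundamentals-19-03-25.py | find_pairs_with_sum_9
-- ===== SOURCE A (Python) =====
-- def find_pairs_with_sum_9(s):
--     alpha_positions = [(i, c) for i, c in enumerate(s) if c.isalpha()]
--     result = []
--
--     for i in range(len(alpha_positions) - 1):
--         for j in range(i + 1, len(alpha_positions)):
--             pos1, char1 = alpha_positions[i]
--             pos2, char2 = alpha_positions[j]
--
--             numbers = ''.join(c for c in s[pos1+1:pos2] if c.isdigit())
--             if numbers and sum(int(d) for d in numbers) == 9: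
--                 result.append(f"{char1},{char2}")
--
--     return '\n'.join(result)
-- ===== SOURCE B (Python) =====
-- def find_pairs_with_sum_9(s):
--     # One pass records, for each alphabetic char, the running digit-sum and
--     # digit-count before it; each pair is then tested in O(1) by differencing.
--     marks = []
--     ds = 0
--     dc = 0
--     for c in s:
--         if c.isalpha():
--             marks.append((c, ds, dc))
--         elif c.isdigit():
--             ds += int(c)
--             dc += 1
--     out = []
--     for i in range(len(marks) - 1):
--         c1, s1, n1 = marks[i]
--         for j in range(i + 1, len(marks)):
--             c2, s2, n2 = marks[j]
--             if n1 < n2 and s2 - s1 == 9: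
--                 out.append(f"{c1},{c2}")
--     return '\n'.join(out)
-- ===== Notes on version B (the rewrite author's own statement) =====
-- stated objective: faster
-- what changed: B replaces A's per-pair re-scan of the substring between the two alphabetic characters by a single pass that records running digit-sum/digit-count prefix values at each alphabetic character, so each pair is tested in O(1) by differencing instead of slicing and summing.
import Mathlib
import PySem

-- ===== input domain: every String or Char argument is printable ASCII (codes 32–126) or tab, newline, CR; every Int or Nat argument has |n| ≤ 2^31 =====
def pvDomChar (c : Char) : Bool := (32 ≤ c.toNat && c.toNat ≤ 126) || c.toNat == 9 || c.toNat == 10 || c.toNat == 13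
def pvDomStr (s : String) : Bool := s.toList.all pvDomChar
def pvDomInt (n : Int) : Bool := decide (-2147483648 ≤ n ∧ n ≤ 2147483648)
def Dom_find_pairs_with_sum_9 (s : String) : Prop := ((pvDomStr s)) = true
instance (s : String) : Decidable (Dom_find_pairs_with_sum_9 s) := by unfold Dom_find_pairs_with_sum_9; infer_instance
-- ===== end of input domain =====

-- B replaces A's per-pair re-scan of the substring by a single pass recording running
-- digit-sum/digit-count prefix values at each alphabetic char, testing each pair in O(1).

-- int(d) for a single digit character d ('0'..'9'): exact there (used only on digit chars)
def pvDigitVal (c : Char) : Int := (c.toNat : Int) - 48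

-- ===== PORT A =====
def find_pairs_with_sum_9 (s : String) : String :=
  let l := s.toList
  let alpha_positions := (PySem.List.enumerate l).filter (fun p => PySem.Chars.isalpha p.2)
  let result := (PySem.List.pyRange 0 ((alpha_positions.length : Int) - 1)).foldl
    (fun result i =>
      (PySem.List.pyRange (i + 1) (alpha_positions.length : Int)).foldl
        (fun result j =>
          let p1 := PySem.List.pyGetD alpha_positions i (0, ' ')
          let p2 := PySem.List.pyGetD alpha_positions j (0, ' ')
          let numbers := (PySem.List.slice l (some (p1.1 + 1)) (some p2.1)).filter
            (fun c => PySem.Chars.isdigit c)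
          if numbers ≠ [] ∧ (numbers.map pvDigitVal).sum = 9 then
            result ++ [[p1.2, ',', p2.2]]
          else result)
        result)
    []
  String.ofList (PySem.Chars.join ['\n'] result)

-- ===== PORT B =====
def find_pairs_with_sum_9_alt (s : String) : String :=
  let st := s.toList.foldl
    (fun (st : List (Char × Int × Int) × Int × Int) c =>
      if PySem.Chars.isalpha c then (st.1 ++ [(c, st.2.1, st.2.2)], st.2.1, st.2.2)
      else if PySem.Chars.isdigit c then (st.1, st.2.1 + pvDigitVal c, st.2.2 + 1)
      else st)
    ([], 0, 0)
  let marks := st.1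
  let out := (PySem.List.pyRange 0 ((marks.length : Int) - 1)).foldl
    (fun out i =>
      let m1 := PySem.List.pyGetD marks i (' ', 0, 0)
      (PySem.List.pyRange (i + 1) (marks.length : Int)).foldl
        (fun out j =>
          let m2 := PySem.List.pyGetD marks j (' ', 0, 0)
          if m1.2.2 < m2.2.2 ∧ m2.2.1 - m1.2.1 = 9 then out ++ [[m1.1, ',', m2.1]]
          else out)
        out)
    []
  String.ofList (PySem.Chars.join ['\n'] out)

-- ===== PRECONDITION & SPEC =====
def Spec_find_pairs_with_sum_9 (s : String) (out : String) : Prop := out = find_pairs_with_sum_9_alt s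
instance (s : String) (out : String) : Decidable (Spec_find_pairs_with_sum_9 s out) := by unfold Spec_find_pairs_with_sum_9; infer_instance

-- ===== CLAIM (what is proved, stated in full; the proofs are below) =====
def Claim_equal_find_pairs_with_sum_9 : Prop := ∀ (s : String), Dom_find_pairs_with_sum_9 s → Spec_find_pairs_with_sum_9 s (find_pairs_with_sum_9 s)

-- ===== LEMMAS AND PROOFS =====

-- digit-sum and digit-count of a char list (prefix-sum quantities)
def pvDsum (xs : List Char) : Int := ((xs.filter (fun c => PySem.Chars.isdigit c)).map pvDigitVal).sum
def pvDcnt (xs : List Char) : Int := ((xs.filter (fun c => PySem.Chars.isdigit c)).length : Int)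

-- the value B's first pass records for an enumerated alpha char of l
def pvMark (l : List Char) (p : Int × Char) : Char × Int × Int :=
  (p.2, pvDsum (l.take p.1.toNat), pvDcnt (l.take p.1.toNat))

lemma alpha_not_digit (c : Char) (h : PySem.Chars.isalpha c = true) :
    PySem.Chars.isdigit c = false := by
  rw [Bool.eq_false_iff]
  intro hd
  simp only [PySem.Chars.isalpha, PySem.Chars.isupper, PySem.Chars.islower,
    Bool.or_eq_true, Bool.and_eq_true, decide_eq_true_eq] at h
  simp only [PySem.Chars.isdigit, Bool.and_eq_true, decide_eq_true_eq] at hd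
  rcases h with ⟨h1, _⟩ | ⟨h1, _⟩
  · exact absurd (le_trans h1 hd.2) (by decide)
  · exact absurd (le_trans h1 hd.2) (by decide)

lemma pvDsum_append (xs ys : List Char) : pvDsum (xs ++ ys) = pvDsum xs + pvDsum ys := by
  simp [pvDsum, List.filter_append]

lemma pvDcnt_append (xs ys : List Char) : pvDcnt (xs ++ ys) = pvDcnt xs + pvDcnt ys := by
  simp [pvDcnt, List.filter_append]

lemma pvDsum_singleton_not_digit (c : Char) (h : PySem.Chars.isdigit c = false) :
    pvDsum [c] = 0 := by simp [pvDsum, List.filter, h]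

lemma pvDcnt_singleton_not_digit (c : Char) (h : PySem.Chars.isdigit c = false) :
    pvDcnt [c] = 0 := by simp [pvDcnt, List.filter, h]

lemma pvDsum_singleton_digit (c : Char) (h : PySem.Chars.isdigit c = true) :
    pvDsum [c] = pvDigitVal c := by simp [pvDsum, List.filter, h]

lemma pvDcnt_singleton_digit (c : Char) (h : PySem.Chars.isdigit c = true) :
    pvDcnt [c] = 1 := by simp [pvDcnt, List.filter, h]

-- the first pass of B, characterised: marks are exactly A's alpha_positions mapped by pvMark
lemma foldB_spec (l : List Char) : ∀ (rest pre : List Char) (m0 : List (Char × Int × Int)),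
    l = pre ++ rest →
    rest.foldl
      (fun (st : List (Char × Int × Int) × Int × Int) c =>
        if PySem.Chars.isalpha c then (st.1 ++ [(c, st.2.1, st.2.2)], st.2.1, st.2.2)
        else if PySem.Chars.isdigit c then (st.1, st.2.1 + pvDigitVal c, st.2.2 + 1)
        else st)
      (m0, pvDsum pre, pvDcnt pre)
    = (m0 ++ ((PySem.List.enumerate rest (pre.length : Int)).filter
          (fun p => PySem.Chars.isalpha p.2)).map (pvMark l),
       pvDsum l, pvDcnt l) := by
  intro rest
  induction rest with
  | nil =>
    intro pre m0 h
    simp [PySem.List.enumerate_nil, h]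
  | cons c t ih =>
    intro pre m0 h
    have hl : l = (pre ++ [c]) ++ t := by simpa [List.append_assoc] using h
    have htake : l.take pre.length = pre := by rw [h]; exact List.take_left
    rw [List.foldl_cons, PySem.List.enumerate_cons, List.filter_cons]
    by_cases ha : PySem.Chars.isalpha c = true
    · have hd := alpha_not_digit c ha
      have hs : pvDsum (pre ++ [c]) = pvDsum pre := by
        rw [pvDsum_append, pvDsum_singleton_not_digit c hd]; ring
      have hc : pvDcnt (pre ++ [c]) = pvDcnt pre := by
        rw [pvDcnt_append, pvDcnt_singleton_not_digit c hd]; ring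
      simp only [ha, if_true]
      rw [(hs.symm : pvDsum pre = pvDsum (pre ++ [c])),
          (hc.symm : pvDcnt pre = pvDcnt (pre ++ [c]))]
      rw [ih (pre ++ [c]) (m0 ++ [(c, pvDsum (pre ++ [c]), pvDcnt (pre ++ [c]))]) hl]
      have hmark : pvMark l ((pre.length : Int), c)
          = (c, pvDsum (pre ++ [c]), pvDcnt (pre ++ [c])) := by
        simp [pvMark, htake, hs, hc]
      simp [hmark]
    · have ha' : PySem.Chars.isalpha c = false := by simpa using ha
      by_cases hd : PySem.Chars.isdigit c = true
      · have hs : pvDsum (pre ++ [c]) = pvDsum pre + pvDigitVal c := by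
          rw [pvDsum_append, pvDsum_singleton_digit c hd]
        have hc : pvDcnt (pre ++ [c]) = pvDcnt pre + 1 := by
          rw [pvDcnt_append, pvDcnt_singleton_digit c hd]
        simp only [ha', Bool.false_eq_true, if_false, hd, if_true]
        rw [← hs, ← hc, ih (pre ++ [c]) m0 hl]
        simp
      · have hd' : PySem.Chars.isdigit c = false := by simpa using hd
        have hs : pvDsum (pre ++ [c]) = pvDsum pre := by
          rw [pvDsum_append, pvDsum_singleton_not_digit c hd']; ring
        have hc : pvDcnt (pre ++ [c]) = pvDcnt pre := by
          rw [pvDcnt_append, pvDcnt_singleton_not_digit c hd']; ring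
        simp only [ha', Bool.false_eq_true, if_false, hd']
        rw [(hs.symm : pvDsum pre = pvDsum (pre ++ [c])),
            (hc.symm : pvDcnt pre = pvDcnt (pre ++ [c]))]
        rw [ih (pre ++ [c]) m0 hl]
        simp

-- A's per-pair test, expressed through prefix sums
lemma pair_cond (l : List Char) (p q : Nat) (hpq : p < q) (_hq : q ≤ l.length)
    (hp : p < l.length) (hpd : PySem.Chars.isdigit l[p] = false) :
    (((PySem.List.slice l (some ((p : Int) + 1)) (some (q : Int))).filter
        (fun c => PySem.Chars.isdigit c) ≠ [] ∧
      (((PySem.List.slice l (some ((p : Int) + 1)) (some (q : Int))).filter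
        (fun c => PySem.Chars.isdigit c)).map pvDigitVal).sum = 9))
    ↔ (pvDcnt (l.take p) < pvDcnt (l.take q) ∧ pvDsum (l.take q) - pvDsum (l.take p) = 9) := by
  have hcast : ((p : Int) + 1) = ((p + 1 : Nat) : Int) := by push_cast; ring
  have hsl : PySem.List.slice l (some ((p : Int) + 1)) (some (q : Int))
      = (l.drop (p + 1)).take (q - (p + 1)) := by
    rw [hcast, PySem.List.slice_natCast]
  have hq' : l.take q = l.take (p + 1) ++ (l.drop (p + 1)).take (q - (p + 1)) := by
    conv_lhs => rw [show q = (p + 1) + (q - (p + 1)) by omega]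
    exact List.take_add
  have ht1 : l.take (p + 1) = l.take p ++ [l[p]] := by
    rw [List.take_add_one]
    simp [List.getElem?_eq_getElem hp]
  have hsum : pvDsum (l.take q)
      = pvDsum (l.take p) + pvDsum ((l.drop (p + 1)).take (q - (p + 1))) := by
    rw [hq', pvDsum_append, ht1, pvDsum_append, pvDsum_singleton_not_digit _ hpd]; ring
  have hcnt : pvDcnt (l.take q)
      = pvDcnt (l.take p) + pvDcnt ((l.drop (p + 1)).take (q - (p + 1))) := by
    rw [hq', pvDcnt_append, ht1, pvDcnt_append, pvDcnt_singleton_not_digit _ hpd]; ring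
  have hcnt0 : pvDcnt ((l.drop (p + 1)).take (q - (p + 1)))
      = ((((l.drop (p + 1)).take (q - (p + 1))).filter (fun c => PySem.Chars.isdigit c)).length : Int) := rfl
  rw [hsl]
  have hseg : pvDsum ((l.drop (p + 1)).take (q - (p + 1)))
      = ((((l.drop (p + 1)).take (q - (p + 1))).filter (fun c => PySem.Chars.isdigit c)).map pvDigitVal).sum := rfl
  constructor
  · rintro ⟨h1, h2⟩
    have hne : (((l.drop (p + 1)).take (q - (p + 1))).filter (fun c => PySem.Chars.isdigit c)).length ≠ 0 := by
      simpa [List.length_eq_zero_iff] using h1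
    have h2' : pvDsum ((l.drop (p + 1)).take (q - (p + 1))) = 9 := h2
    exact ⟨by omega, by omega⟩
  · rintro ⟨h1, h2⟩
    have hne : (((l.drop (p + 1)).take (q - (p + 1))).filter (fun c => PySem.Chars.isdigit c)).length ≠ 0 := by
      omega
    have h2' : pvDsum ((l.drop (p + 1)).take (q - (p + 1))) = 9 := by omega
    refine ⟨by simpa [List.length_eq_zero_iff] using hne, ?_⟩
    rw [← hseg]
    exact h2'

-- structure of an element of alpha_positions
lemma ap_elem (l : List Char) (t : Nat)
    (ht : t < ((PySem.List.enumerate l).filter (fun p => PySem.Chars.isalpha p.2)).length) :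
    ∃ (k : Nat) (hk : k < l.length),
      ((PySem.List.enumerate l).filter (fun p => PySem.Chars.isalpha p.2))[t] = ((k : Int), l[k])
      ∧ PySem.Chars.isalpha l[k] = true := by
  have hmem := List.getElem_mem ht
  have hmf := List.mem_filter.mp hmem
  obtain ⟨k, hk, hpk⟩ := (PySem.List.mem_enumerate_iff l 0 _).mp hmf.1
  refine ⟨k, hk, ?_, ?_⟩
  · simpa using hpk
  · have := hmf.2
    rw [hpk] at this
    simpa using this

lemma ap_pairwise (l : List Char) :
    ((PySem.List.enumerate l).filter (fun p => PySem.Chars.isalpha p.2)).Pairwise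
      (fun p q => p.1 < q.1) :=
  List.Pairwise.filter _ (PySem.List.pairwise_lt_enumerate l 0)

-- ===== VERDICT (by name: the statement is the Claim_ definition above) =====
theorem find_pairs_with_sum_9_spec : Claim_equal_find_pairs_with_sum_9 := by
  intro s _
  unfold Spec_find_pairs_with_sum_9 find_pairs_with_sum_9 find_pairs_with_sum_9_alt
  have hfold := foldB_spec s.toList s.toList [] [] rfl
  simp only [List.nil_append, List.length_nil, Nat.cast_zero] at hfold
  have h0 : pvDsum ([] : List Char) = 0 := rfl
  have h0' : pvDcnt ([] : List Char) = 0 := rfl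
  rw [h0, h0'] at hfold
  have hmarks : (List.foldl
      (fun (st : List (Char × Int × Int) × Int × Int) c =>
        if PySem.Chars.isalpha c then (st.1 ++ [(c, st.2.1, st.2.2)], st.2.1, st.2.2)
        else if PySem.Chars.isdigit c then (st.1, st.2.1 + pvDigitVal c, st.2.2 + 1)
        else st) ([], 0, 0) s.toList).1
      = List.map (pvMark s.toList)
          ((PySem.List.enumerate s.toList).filter (fun p => PySem.Chars.isalpha p.2)) := by
    rw [hfold]
  simp only [hmarks, List.length_map]
  apply congrArg
  apply congrArg
  apply PySem.List.foldl_congr_mem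
  intro acc i hi
  rw [PySem.List.mem_pyRange_one] at hi
  apply PySem.List.foldl_congr_mem
  intro acc2 j hj
  rw [PySem.List.mem_pyRange_one] at hj
  have hilen : i < (((PySem.List.enumerate s.toList).filter (fun p => PySem.Chars.isalpha p.2)).length : Int) := by omega
  have hjlen : j < (((PySem.List.enumerate s.toList).filter (fun p => PySem.Chars.isalpha p.2)).length : Int) := hj.2
  have hj0 : (0 : Int) ≤ j := by omega
  rw [PySem.List.pyGetD_eq_getElem _ _ hi.1 hilen, PySem.List.pyGetD_eq_getElem _ _ hj0 hjlen,
    PySem.List.pyGetD_eq_getElem _ _ hi.1 (by simpa using hilen),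
    PySem.List.pyGetD_eq_getElem _ _ hj0 (by simpa using hjlen)]
  have hi' : i.toNat < ((PySem.List.enumerate s.toList).filter (fun p => PySem.Chars.isalpha p.2)).length := by omega
  have hj' : j.toNat < ((PySem.List.enumerate s.toList).filter (fun p => PySem.Chars.isalpha p.2)).length := by omega
  have hij : i.toNat < j.toNat := by omega
  obtain ⟨k1, hk1, he1, ha1⟩ := ap_elem s.toList i.toNat hi'
  obtain ⟨k2, hk2, he2, ha2⟩ := ap_elem s.toList j.toNat hj'
  have hk12 : k1 < k2 := by
    have := (List.pairwise_iff_getElem.mp (ap_pairwise s.toList)) i.toNat j.toNat hi' hj' hij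
    rw [he1, he2] at this
    have h' : ((k1 : Int)) < ((k2 : Int)) := by simpa using this
    exact_mod_cast h'
  rw [List.getElem_map, List.getElem_map, he1, he2]
  have hm1 : pvMark s.toList ((k1 : Int), s.toList[k1])
      = (s.toList[k1], pvDsum (s.toList.take k1), pvDcnt (s.toList.take k1)) := by
    simp [pvMark]
  have hm2 : pvMark s.toList ((k2 : Int), s.toList[k2])
      = (s.toList[k2], pvDsum (s.toList.take k2), pvDcnt (s.toList.take k2)) := by
    simp [pvMark]
  rw [hm1, hm2]
  have hiff := pair_cond s.toList k1 k2 hk12 (le_of_lt hk2) hk1 (alpha_not_digit _ ha1)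
  dsimp only
  exact if_congr hiff rfl rfl
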